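-- pv_equiv track=rewrite | github.com/Mr-Kondo/agentic_debating_llms | app/licenses/collector.py | _extract_home_url
-- ===== SOURCE A (Python) =====
-- def _extract_home_url(metadata_text: str) -> str:
--     """Extract a representative project homepage URL from METADATA text."""
--     home_page: str = ""
--     project_urls: dict[str, str] = {}
--
--     for line in metadata_text.splitlines():
--         if line.startswith("Home-page:"):
--             value = line.split(":", 1)[1].strip()
--             if value and value.upper() != "UNKNOWN":
--                 home_page = value
--         elif line.startswith("Project-URL:"):
--             rest = line.split(":", 1)[1].strip()
--             if "," in rest:
--                 label, url = rest.split(",", 1)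
--                 project_urls[label.strip().lower()] = url.strip()
--
--     for label in ("homepage", "source", "repository", "documentation"):
--         if label in project_urls:
--             return project_urls[label]
--     return home_page
-- ===== SOURCE B (Python) =====
-- def _extract_home_url(metadata_text: str) -> str:
--     """Extract a representative project homepage URL from METADATA text."""
--     rev = list(reversed(metadata_text.splitlines()))
--
--     def project_url(line, label):
--         # url of this Project-URL line if its label matches, else None
--         if line.startswith("Project-URL:"):
--             rest = line.split(":", 1)[1].strip()
--             if "," in rest:
--                 lab, url = rest.split(",", 1)
--                 if lab.strip().lower() == label:
--                     return url.strip()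
--         return None
--
--     for label in ("homepage", "source", "repository", "documentation"):
--         for line in rev:
--             url = project_url(line, label)
--             if url is not None:
--                 return url
--
--     for line in rev:
--         if line.startswith("Home-page:"):
--             value = line.split(":", 1)[1].strip()
--             if value and value.upper() != "UNKNOWN":
--                 return value
--     return ""
-- ===== Notes on version B (the rewrite author's own statement) =====
-- stated objective: alternative
-- what changed: Replaces A's single forward pass that builds a dict of all Project-URL labels plus a second preference loop by per-label first-match searches over the reversed line list (last-wins becomes first-match), with a separate reversed search for the Home-page fallback; no dict and no accumulating fold are used.
import Mathlib
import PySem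

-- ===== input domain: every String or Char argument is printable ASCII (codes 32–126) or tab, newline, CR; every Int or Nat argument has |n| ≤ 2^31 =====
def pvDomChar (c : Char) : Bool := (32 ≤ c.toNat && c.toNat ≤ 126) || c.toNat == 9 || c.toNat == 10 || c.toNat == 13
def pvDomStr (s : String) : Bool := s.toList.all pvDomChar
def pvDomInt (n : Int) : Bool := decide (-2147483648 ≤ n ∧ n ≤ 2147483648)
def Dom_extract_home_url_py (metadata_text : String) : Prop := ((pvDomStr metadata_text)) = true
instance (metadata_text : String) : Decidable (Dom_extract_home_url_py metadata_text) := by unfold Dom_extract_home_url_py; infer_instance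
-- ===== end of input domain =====

-- B replaces A's dict-building pass + preference loop by per-label first-match searches
-- over the reversed line list (objective: alternative decomposition, same cost).

-- ===== PORT A =====
-- loop body of A's for-line loop; state = (home_page, project_urls).
-- line.split(":", 1)[1] is ported as .getD 1 "": inside both branches line starts with
-- "Home-page:"/"Project-URL:", so the split always has a second piece and getD is exact.
def stepA (st : String × PySem.Dict String String) (line : String) : String × PySem.Dict String String :=
  if PySem.Str.startswith line "Home-page:" then
    let value := PySem.Str.strip (((PySem.Str.splitMax? line ":" 1).getD []).getD 1 "")
    if value ≠ "" ∧ PySem.Str.upper value ≠ "UNKNOWN" then (value, st.2) else st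
  else if PySem.Str.startswith line "Project-URL:" then
    let rest := PySem.Str.strip (((PySem.Str.splitMax? line ":" 1).getD []).getD 1 "")
    if PySem.Str.isIn "," rest then
      -- rest contains ",", so rest.split(",", 1) has exactly two pieces; getD is exact
      let parts := (PySem.Str.splitMax? rest "," 1).getD []
      (st.1, st.2.insert (PySem.Str.lower (PySem.Str.strip (parts.getD 0 ""))) (PySem.Str.strip (parts.getD 1 "")))
    else st
  else st

def extract_home_url_py (metadata_text : String) : String :=
  let st := (PySem.Str.splitlines metadata_text).foldl stepA ("", PySem.Dict.empty)
  -- for label in ("homepage", "source", "repository", "documentation"): if label in d: return d[label]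
  match st.2.get? "homepage" with
  | some u => u
  | none =>
    match st.2.get? "source" with
    | some u => u
    | none =>
      match st.2.get? "repository" with
      | some u => u
      | none =>
        match st.2.get? "documentation" with
        | some u => u
        | none => st.1

-- ===== PORT B =====
-- Source B's helper project_url(line, label): the url of this Project-URL line if its label matches.
def projectUrl (line label : String) : Option String :=
  if PySem.Str.startswith line "Project-URL:" then
    let rest := PySem.Str.strip (((PySem.Str.splitMax? line ":" 1).getD []).getD 1 "")
    if PySem.Str.isIn "," rest then
      let parts := (PySem.Str.splitMax? rest "," 1).getD []
      if PySem.Str.lower (PySem.Str.strip (parts.getD 0 "")) = label then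
        some (PySem.Str.strip (parts.getD 1 ""))
      else none
    else none
  else none

-- Source B's inner 'for line in rev: … return url' loop for one label: first match wins.
def findUrl (label : String) : List String → Option String
  | [] => none
  | l :: ls =>
    match projectUrl l label with
    | some u => some u
    | none => findUrl label ls

-- Source B's final fallback loop: first valid non-UNKNOWN Home-page value in rev.
def findHome : List String → Option String
  | [] => none
  | l :: ls =>
    if PySem.Str.startswith l "Home-page:" then
      let value := PySem.Str.strip (((PySem.Str.splitMax? l ":" 1).getD []).getD 1 "")
      if value ≠ "" ∧ PySem.Str.upper value ≠ "UNKNOWN" then some value else findHome ls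
    else findHome ls

def extract_home_url_py_alt (metadata_text : String) : String :=
  let rev := (PySem.Str.splitlines metadata_text).reverse
  -- for label in ("homepage", "source", "repository", "documentation"): unrolled
  match findUrl "homepage" rev with
  | some u => u
  | none =>
    match findUrl "source" rev with
    | some u => u
    | none =>
      match findUrl "repository" rev with
      | some u => u
      | none =>
        match findUrl "documentation" rev with
        | some u => u
        | none =>
          match findHome rev with
          | some v => v
          | none => ""

-- ===== PRECONDITION & SPEC =====
def Spec_extract_home_url_py (metadata_text : String) (out : String) : Prop := out = extract_home_url_py_alt metadata_text
instance (metadata_text : String) (out : String) : Decidable (Spec_extract_home_url_py metadata_text out) := by unfold Spec_extract_home_url_py; infer_instance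

-- ===== CLAIM (what is proved, stated in full; the proofs are below) =====
def Claim_equal_extract_home_url_py : Prop := ∀ (metadata_text : String), Dom_extract_home_url_py metadata_text → Spec_extract_home_url_py metadata_text (extract_home_url_py metadata_text)

-- ===== LEMMAS AND PROOFS =====

theorem findUrl_append (label : String) (xs ys : List String) :
    findUrl label (xs ++ ys) = (findUrl label xs).or (findUrl label ys) := by
  induction xs with
  | nil => simp [findUrl]
  | cons l ls ih =>
    simp only [List.cons_append, findUrl]
    cases projectUrl l label <;> simp [ih]

theorem findHome_append (xs ys : List String) :
    findHome (xs ++ ys) = (findHome xs).or (findHome ys) := by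
  induction xs with
  | nil => simp [findHome]
  | cons l ls ih =>
    simp only [List.cons_append, findHome]
    split_ifs <;> simp [ih]

theorem not_both_prefix (l : String) (h : PySem.Str.startswith l "Home-page:" = true) :
    PySem.Str.startswith l "Project-URL:" = false := by
  by_contra hc
  rw [Bool.not_eq_false] at hc
  have h1 : ("Home-page:".toList) <+: l.toList := by
    have := (PySem.Chars.startswith_iff l.toList "Home-page:".toList).1 (by simpa using h)
    exact this
  have h2 : ("Project-URL:".toList) <+: l.toList := by
    have := (PySem.Chars.startswith_iff l.toList "Project-URL:".toList).1 (by simpa using hc)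
    exact this
  have h3 : ("Home-page:".toList) <+: ("Project-URL:".toList) :=
    List.prefix_of_prefix_length_le h1 h2 (by decide)
  exact absurd h3 (by decide)

-- one step of A's fold, projected on home_page, equals the one-line findHome
theorem step_home (h0 : String) (d0 : PySem.Dict String String) (l : String) :
    (stepA (h0, d0) l).1 = (findHome [l]).getD h0 := by
  simp only [stepA, findHome]
  split_ifs <;> rfl

-- one step of A's fold, projected on the dict at any key, equals the one-line findUrl
theorem step_dict (h0 : String) (d0 : PySem.Dict String String) (l lab : String) :
    ((stepA (h0, d0) l).2).get? lab = (findUrl lab [l]).or (d0.get? lab) := by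
  simp only [stepA, findUrl, projectUrl]
  by_cases hp : PySem.Str.startswith l "Home-page:" = true
  · rw [not_both_prefix l hp]
    simp only [hp, if_true, Bool.false_eq_true, if_false]
    split_ifs <;> rfl
  · simp only [hp, Bool.false_eq_true, if_false]
    by_cases hu : PySem.Str.startswith l "Project-URL:" = true
    · simp only [hu, if_true]
      by_cases hc : PySem.Str.isIn ","
          (PySem.Str.strip (((PySem.Str.splitMax? l ":" 1).getD []).getD 1 "")) = true
      · simp only [hc, if_true]
        by_cases he : PySem.Str.lower (PySem.Str.strip
            ((((PySem.Str.splitMax? (PySem.Str.strip (((PySem.Str.splitMax? l ":" 1).getD []).getD 1 "")) "," 1).getD []).getD 0 ""))) = lab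
        · rw [if_pos he]
          simp only [PySem.Dict.get?_insert, he, if_true]
          rfl
        · rw [if_neg he]
          simp only [PySem.Dict.get?_insert]
          rw [if_neg (fun h => he h.symm)]
          rfl
      · simp only [hc, Bool.false_eq_true, if_false]
        rfl
    · simp only [hu, Bool.false_eq_true, if_false]
      rfl

-- invariant of A's whole fold, phrased with B's reversed-first-match searches
theorem fold_inv (lines : List String) (h0 : String) (d0 : PySem.Dict String String) :
    (lines.foldl stepA (h0, d0)).1 = (findHome lines.reverse).getD h0 ∧
      ∀ lab, ((lines.foldl stepA (h0, d0)).2).get? lab = (findUrl lab lines.reverse).or (d0.get? lab) := by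
  induction lines generalizing h0 d0 with
  | nil => simp [findHome, findUrl]
  | cons l ls ih =>
    simp only [List.foldl_cons, List.reverse_cons]
    rcases e : stepA (h0, d0) l with ⟨h1, d1⟩
    obtain ⟨ihh, ihd⟩ := ih h1 d1
    constructor
    · rw [ihh, findHome_append]
      have hs := step_home h0 d0 l
      rw [e] at hs; simp only at hs
      cases findHome ls.reverse <;> simp [Option.or, hs]
    · intro lab
      rw [ihd lab, findUrl_append]
      have hs := step_dict h0 d0 l lab
      rw [e] at hs; simp only at hs
      rw [hs, Option.or_assoc]

-- ===== VERDICT (by name: the statement is the Claim_ definition above) =====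
theorem extract_home_url_py_spec : Claim_equal_extract_home_url_py := by
  intro metadata_text _
  unfold Spec_extract_home_url_py extract_home_url_py extract_home_url_py_alt
  obtain ⟨hh, hd⟩ := fold_inv (PySem.Str.splitlines metadata_text) "" PySem.Dict.empty
  have hd' : ∀ lab, ((PySem.Str.splitlines metadata_text).foldl stepA ("", PySem.Dict.empty)).2.get? lab
      = findUrl lab (PySem.Str.splitlines metadata_text).reverse := by
    intro lab
    rw [hd lab, PySem.Dict.get?_empty, Option.or_none]
  simp only [hd' "homepage", hd' "source", hd' "repository", hd' "documentation", hh]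
  cases findUrl "homepage" (PySem.Str.splitlines metadata_text).reverse <;>
  cases findUrl "source" (PySem.Str.splitlines metadata_text).reverse <;>
  cases findUrl "repository" (PySem.Str.splitlines metadata_text).reverse <;>
  cases findUrl "documentation" (PySem.Str.splitlines metadata_text).reverse <;>
  cases findHome (PySem.Str.splitlines metadata_text).reverse <;> rfl
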